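-- pv_equiv track=rewrite | github.com/gabriela-tomsa/gabriela-tomsa | hangman/main.py | auto_guess_word
-- ===== SOURCE A (Python) =====
-- def update_possible_letters(possible_letters, pattern, guessed_letters):
--     new_possible = []
--     for l in possible_letters:
--         if l not in guessed_letters and l not in pattern:
--             new_possible.append(l)
--     return new_possible
--
-- def auto_guess_word(pattern_initial, answer, letter_order):
--     pattern = list(pattern_initial.upper())  # transforma pattern in lista
--     answer_upper = answer.upper()
--     guessed_letters = []
--     for ch in pattern:
--         if ch != "*":
--             guessed_letters.append(ch)
--
--     attempts = 0
--     sequence = []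
--
--     possible_letters = letter_order.copy()
--
--     while "*" in pattern:  # cat timp mai sunt litere necunoscute
--         possible_letters = update_possible_letters(possible_letters, pattern, guessed_letters)
--         guess = None
--         for l in letter_order:  # ia litere in ordinea prioritatii
--             if l in possible_letters:
--                 guess = l
--                 break
--         if guess is None:
--             break
--
--         guessed_letters.append(guess)
--         sequence.append(guess)
--         attempts += 1
--
--         # completeaza toate pozitiile cu litera ghicita
--         for i in range(len(pattern)):
--             if answer_upper[i] == guess:
--                 pattern[i] = guess
--
--     word_found = "".join(pattern)
--     status = "OK" if word_found == answer_upper else "EROARE"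
--     return attempts, word_found, status, sequence
-- ===== SOURCE B (Python) =====
-- def auto_guess_word(pattern_initial, answer, letter_order):
--     pattern = list(pattern_initial.upper())
--     answer_upper = answer.upper()
--     known = set(pattern)  # symbols already on display (revealed letters and '*')
--     attempts = 0
--     sequence = []
--     for l in letter_order:
--         if "*" not in pattern:
--             break
--         if l in known:
--             continue
--         known.add(l)
--         sequence.append(l)
--         attempts += 1
--         for i in range(len(pattern)):
--             if answer_upper[i] == l:
--                 pattern[i] = l
--     word_found = "".join(pattern)
--     status = "OK" if word_found == answer_upper else "EROARE"
--     return attempts, word_found, status, sequence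
-- ===== Notes on version B (the rewrite author's own statement) =====
-- stated objective: faster
-- what changed: Replaces the while-loop that rebuilds possible_letters (a full filter of letter_order against guessed letters and the pattern) and rescans letter_order for the first available guess on every iteration with a single in-order pass over letter_order that skips candidates via an O(1) 'known' set lookup (displayed symbols plus previous guesses) and guesses each remaining one directly.
import Mathlib
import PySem

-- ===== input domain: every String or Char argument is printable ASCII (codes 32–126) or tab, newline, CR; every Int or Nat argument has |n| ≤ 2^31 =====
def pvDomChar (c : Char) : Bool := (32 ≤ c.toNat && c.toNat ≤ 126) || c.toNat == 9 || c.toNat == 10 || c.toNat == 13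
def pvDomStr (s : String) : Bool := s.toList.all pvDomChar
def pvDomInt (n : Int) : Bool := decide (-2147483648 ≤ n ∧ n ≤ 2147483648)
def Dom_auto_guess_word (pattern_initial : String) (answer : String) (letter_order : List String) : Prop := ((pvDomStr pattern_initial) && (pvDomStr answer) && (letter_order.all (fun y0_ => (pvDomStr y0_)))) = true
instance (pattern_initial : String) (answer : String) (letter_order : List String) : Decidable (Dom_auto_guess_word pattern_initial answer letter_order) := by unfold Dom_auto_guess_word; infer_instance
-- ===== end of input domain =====

-- B replaces A's while-loop that repeatedly rebuilds possible_letters and rescans letter_order with a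
-- single in-order pass over letter_order skipping a 'known' set (objective: simpler decomposition).

-- ===== PORT A =====
def update_possible_letters (possible_letters : List String) (pattern : List String) (guessed_letters : List String) : List String :=
  possible_letters.foldl (fun acc l => if !(guessed_letters.contains l) && !(pattern.contains l) then acc ++ [l] else acc) []

-- for i in range(len(pattern)): if answer_upper[i] == guess: pattern[i] = guess
-- (answer_upper[i] out of range is Python's IndexError: excluded by Pre_; the port leaves pattern unchanged there)
def agwFillA (answerU : List Char) (guess : String) (pattern : List String) : List String :=
  (PySem.List.pyRange 0 (PySem.List.len pattern) 1).foldl (fun pat i =>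
    match PySem.List.pyGet? answerU i with
    | some c => if String.ofList [c] = guess then PySem.List.pySetD pat i guess else pat
    | none => pat) pattern

-- the while loop; fuel only makes the recursion structural (each guess shrinks possible_letters)
def agwLoopA (letter_order : List String) (answerU : List Char) : Nat → List String → List String → List String → Int → List String → Int × List String × List String
  | 0, pattern, _, _, attempts, sequence => (attempts, pattern, sequence)
  | fuel+1, pattern, guessed, possible, attempts, sequence =>
    if pattern.contains "*" then
      let possible' := update_possible_letters possible pattern guessed
      match letter_order.find? (fun l => possible'.contains l) with
      | none => (attempts, pattern, sequence)
      | some guess =>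
        agwLoopA letter_order answerU fuel (agwFillA answerU guess pattern) (guessed ++ [guess]) possible' (attempts + 1) (sequence ++ [guess])
    else (attempts, pattern, sequence)

def auto_guess_word (pattern_initial : String) (answer : String) (letter_order : List String) : Int × String × String × List String :=
  let pattern := (PySem.Str.upper pattern_initial).toList.map (fun c => String.ofList [c])
  let answerU := (PySem.Str.upper answer).toList
  let guessed := pattern.foldl (fun acc ch => if ch ≠ "*" then acc ++ [ch] else acc) []
  let r := agwLoopA letter_order answerU (letter_order.length + 1) pattern guessed letter_order 0 []
  let word := PySem.Str.join "" r.2.1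
  (r.1, word, if word = PySem.Str.upper answer then "OK" else "EROARE", r.2.2)

-- ===== PORT B =====
def agwFillB (answerU : List Char) (guess : String) (pattern : List String) : List String :=
  (PySem.List.pyRange 0 (PySem.List.len pattern) 1).foldl (fun pat i =>
    match PySem.List.pyGet? answerU i with
    | some c => if String.ofList [c] = guess then PySem.List.pySetD pat i guess else pat
    | none => pat) pattern

-- single pass over letter_order with the 'known' set
def agwLoopB (answerU : List Char) : List String → List String → PySem.Set String → Int → List String → List String × PySem.Set String × Int × List String
  | [], pattern, known, attempts, sequence => (pattern, known, attempts, sequence)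
  | l :: rest, pattern, known, attempts, sequence =>
    if !(pattern.contains "*") then (pattern, known, attempts, sequence)
    else if PySem.Set.contains known l then agwLoopB answerU rest pattern known attempts sequence
    else agwLoopB answerU rest (agwFillB answerU l pattern) (PySem.Set.add known l) (attempts + 1) (sequence ++ [l])

def auto_guess_word_alt (pattern_initial : String) (answer : String) (letter_order : List String) : Int × String × String × List String :=
  let pattern := (PySem.Str.upper pattern_initial).toList.map (fun c => String.ofList [c])
  let answerU := (PySem.Str.upper answer).toList
  let known := PySem.Set.ofList pattern
  let r := agwLoopB answerU letter_order pattern known 0 []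
  let word := PySem.Str.join "" r.1
  (r.2.2.1, word, if word = PySem.Str.upper answer then "OK" else "EROARE", r.2.2.2)

-- ===== PRECONDITION & SPEC =====
-- Pre_ excludes exactly the inputs where Python A raises IndexError: the answer is shorter than the
-- pattern, the pattern still shows '*', and some letter_order entry is guessable (not a single
-- character already shown in the pattern) — then the first fill loop indexes past the answer.
def Pre_auto_guess_word (pattern_initial : String) (answer : String) (letter_order : List String) : Prop :=
  ¬ ((PySem.Str.upper answer).toList.length < (PySem.Str.upper pattern_initial).toList.length ∧
     '*' ∈ (PySem.Str.upper pattern_initial).toList ∧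
     ∃ l ∈ letter_order, ¬ ∃ c ∈ (PySem.Str.upper pattern_initial).toList, l = String.ofList [c])
instance (pattern_initial : String) (answer : String) (letter_order : List String) : Decidable (Pre_auto_guess_word pattern_initial answer letter_order) := by unfold Pre_auto_guess_word; infer_instance

def pvWitness_auto_guess_word : String × String × List String := ("A*", "AB", ["B", "A"])

def Spec_auto_guess_word (pattern_initial : String) (answer : String) (letter_order : List String) (out : Int × String × String × List String) : Prop := out = auto_guess_word_alt pattern_initial answer letter_order
instance (pattern_initial : String) (answer : String) (letter_order : List String) (out : Int × String × String × List String) : Decidable (Spec_auto_guess_word pattern_initial answer letter_order out) := by unfold Spec_auto_guess_word; infer_instance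

-- ===== CLAIM (what is proved, stated in full; the proofs are below) =====
def Claim_equal_auto_guess_word : Prop := ∀ (pattern_initial : String) (answer : String) (letter_order : List String), Dom_auto_guess_word pattern_initial answer letter_order → Pre_auto_guess_word pattern_initial answer letter_order → Spec_auto_guess_word pattern_initial answer letter_order (auto_guess_word pattern_initial answer letter_order)

-- ===== LEMMAS AND PROOFS =====

-- availability of a candidate letter in A's sense (proof-side helper)
def agwAvail (pattern guessed : List String) (l : String) : Bool :=
  !(guessed.contains l) && !(pattern.contains l)

theorem agwFill_eq : agwFillA = agwFillB := by
  unfold agwFillA agwFillB; rfl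

theorem agwLoopB_no_star (answerU : List Char) (rest pattern : List String)
    (known : PySem.Set String) (att : Int) (seq : List String)
    (h : pattern.contains "*" = false) :
    agwLoopB answerU rest pattern known att seq = (pattern, known, att, seq) := by
  cases rest <;> simp_all [agwLoopB, List.contains_eq_mem]

theorem agw_find?_congr {α : Type} (p q : α → Bool) :
    ∀ (l : List α), (∀ x ∈ l, p x = q x) → l.find? p = l.find? q
  | [], _ => rfl
  | x :: xs, h => by
    simp only [List.find?_cons, h x (by simp)]
    cases q x
    · exact agw_find?_congr p q xs (fun y hy => h y (by simp [hy]))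
    · rfl

theorem agw_find?_append {α : Type} (p : α → Bool) (pre ys : List α)
    (h : ∀ x ∈ pre, p x = false) : (pre ++ ys).find? p = ys.find? p := by
  induction pre with
  | nil => rfl
  | cons x xs ih =>
    simp only [List.cons_append, List.find?_cons, h x (by simp)]
    exact ih (fun y hy => h y (by simp [hy]))

theorem agw_mem_pySetD {α : Type} (xs : List α) (i : Int) (v s : α)
    (h : s ∈ PySem.List.pySetD xs i v) : s ∈ xs ∨ s = v := by
  unfold PySem.List.pySetD PySem.List.pySet? at h
  cases hk : PySem.List.pyIdx? xs.length i with
  | none => rw [hk] at h; exact Or.inl (by simpa using h)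
  | some k =>
    rw [hk] at h
    simp only [Option.map_some, Option.getD_some] at h
    exact List.mem_or_eq_of_mem_set h

theorem mem_agwFill_aux (answerU : List Char) (g : String) :
    ∀ (idxs : List Int) (pat : List String) (s : String),
      s ∈ idxs.foldl (fun pat i =>
        match PySem.List.pyGet? answerU i with
        | some c => if String.ofList [c] = g then PySem.List.pySetD pat i g else pat
        | none => pat) pat → s ∈ pat ∨ s = g
  | [], _, _, h => Or.inl h
  | i :: idxs, pat, s, h => by
    rcases mem_agwFill_aux answerU g idxs _ s h with h' | h'
    · beta_reduce at h'
      cases hc : PySem.List.pyGet? answerU i with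
      | none => rw [hc] at h'; simp only at h'; exact Or.inl h'
      | some c =>
        rw [hc] at h'; simp only at h'
        by_cases he : String.ofList [c] = g
        · rw [if_pos he] at h'; exact agw_mem_pySetD pat i g s h'
        · rw [if_neg he] at h'; exact Or.inl h'
    · exact Or.inr h'

theorem mem_agwFillB' (answerU : List Char) (g : String) (pattern : List String)
    (s : String) (hs : s ∈ agwFillB answerU g pattern) : s ∈ pattern ∨ s = g := by
  unfold agwFillB at hs
  exact mem_agwFill_aux answerU g _ pattern s hs

theorem upd_eq_filter' (possible pattern guessed : List String) :
    update_possible_letters possible pattern guessed = possible.filter (agwAvail pattern guessed) := by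
  have h := PySem.List.foldl_append_if_eq_filter
    (fun l => !(guessed.contains l) && !(pattern.contains l)) (l := possible) (acc := ([] : List String))
  unfold update_possible_letters
  rw [h, List.nil_append]
  rfl

theorem agw_main' (answerU : List Char) (lo : List String) :
    ∀ (rest pre : List String), lo = pre ++ rest →
    ∀ (fuel : Nat) (pattern guessed possible : List String) (known : PySem.Set String)
      (att : Int) (seq : List String),
    rest.length < fuel →
    (∀ s ∈ pattern, s ≠ "*" → s ∈ guessed) →
    (∀ x : String, x ∈ known ↔ (x ∈ guessed ∨ x = "*")) →
    (∀ l ∈ pre, l ∈ guessed ∨ l = "*") →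
    (∀ x ∈ possible, x ∈ lo) →
    (pattern.contains "*" = true → ∀ x ∈ lo, agwAvail pattern guessed x = true → x ∈ possible) →
    agwLoopA lo answerU fuel pattern guessed possible att seq
      = ((agwLoopB answerU rest pattern known att seq).2.2.1,
         (agwLoopB answerU rest pattern known att seq).1,
         (agwLoopB answerU rest pattern known att seq).2.2.2) := by
  intro rest
  induction rest with
  | nil =>
    intro pre hlo fuel pattern guessed possible known att seq hfuel hP1 hK hpre hposs hposs2
    cases fuel with
    | zero => omega
    | succ f =>
      by_cases hstar : pattern.contains "*" = true
      · have hnone : lo.find? (fun x => (update_possible_letters possible pattern guessed).contains x) = none := by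
          rw [List.find?_eq_none]
          intro x hx
          rw [upd_eq_filter']
          simp only [List.contains_eq_mem, List.mem_filter, decide_eq_true_eq, not_and]
          intro hxp
          have hx' : x ∈ guessed ∨ x = "*" := hpre x (by simpa [hlo] using hx)
          rcases hx' with h | h
          · simp [agwAvail, List.contains_eq_mem, h]
          · subst h
            have hstarm : "*" ∈ pattern := by simpa [List.contains_eq_mem] using hstar
            simp [agwAvail, List.contains_eq_mem, hstarm]
        simp only [List.contains_eq_mem] at hnone
        simp [agwLoopA, agwLoopB, hnone]
      · have hstarm : "*" ∉ pattern := by simpa [List.contains_eq_mem] using hstar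
        simp [agwLoopA, agwLoopB, List.contains_eq_mem, hstarm]
  | cons l rest' ih =>
    intro pre hlo fuel pattern guessed possible known att seq hfuel hP1 hK hpre hposs hposs2
    cases fuel with
    | zero => omega
    | succ f =>
      by_cases hstar : pattern.contains "*" = true
      · by_cases hkl : l ∈ known
        · -- skip this candidate
          have hB : agwLoopB answerU (l :: rest') pattern known att seq
              = agwLoopB answerU rest' pattern known att seq := by
            have hstarm : "*" ∈ pattern := by simpa [List.contains_eq_mem] using hstar
            simp [agwLoopB, List.contains_eq_mem, hstarm, hkl]
          rw [hB]
          refine ih (pre ++ [l]) (by simp [hlo]) (f+1) pattern guessed possible known att seq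
            (by simp at hfuel ⊢; omega) hP1 hK ?_ hposs hposs2
          intro y hy
          rcases List.mem_append.1 hy with h | h
          · exact hpre y h
          · have hy : y = l := by simpa using h
            rw [hy]
            rcases (hK l).1 hkl with h' | h'
            · exact Or.inl h'
            · exact Or.inr h'
        · -- guess this candidate
          have hstarm : "*" ∈ pattern := by simpa [List.contains_eq_mem] using hstar
          have hlng : l ∉ guessed := fun h => hkl ((hK l).2 (Or.inl h))
          have hlns : l ≠ "*" := fun h => hkl ((hK l).2 (Or.inr h))
          have hlpat : l ∉ pattern := fun h => hlng (hP1 l h hlns)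
          have havl : agwAvail pattern guessed l = true := by
            simp [agwAvail, List.contains_eq_mem, hlng, hlpat]
          have hpre' : ∀ x ∈ pre, agwAvail pattern guessed x = false := by
            intro x hx
            rcases hpre x hx with h | h
            · simp [agwAvail, List.contains_eq_mem, h]
            · subst h
              have hstarm : "*" ∈ pattern := by simpa [List.contains_eq_mem] using hstar
              simp [agwAvail, List.contains_eq_mem, hstarm]
          have hfind : lo.find? (fun x => (update_possible_letters possible pattern guessed).contains x) = some l := by
            have hcong : lo.find? (fun x => (update_possible_letters possible pattern guessed).contains x)
                = lo.find? (agwAvail pattern guessed) := by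
              apply agw_find?_congr
              intro x hx
              rw [upd_eq_filter']
              simp only [List.contains_eq_mem, List.mem_filter]
              cases hax : agwAvail pattern guessed x
              · simp
              · simp [hposs2 hstar x hx hax]
            rw [hcong, hlo, agw_find?_append _ pre _ hpre']
            exact List.find?_cons_of_pos havl
          have hstep : agwLoopA lo answerU (f+1) pattern guessed possible att seq
              = agwLoopA lo answerU f (agwFillA answerU l pattern) (guessed ++ [l])
                  (update_possible_letters possible pattern guessed) (att + 1) (seq ++ [l]) := by
            simp only [List.contains_eq_mem] at hfind
            simp [agwLoopA, List.contains_eq_mem, hstarm, hfind]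
          have hBstep : agwLoopB answerU (l :: rest') pattern known att seq
              = agwLoopB answerU rest' (agwFillB answerU l pattern) (PySem.Set.add known l) (att + 1) (seq ++ [l]) := by
            simp [agwLoopB, List.contains_eq_mem, hstarm, hkl]
          rw [hstep, hBstep, show agwFillA = agwFillB from agwFill_eq]
          refine ih (pre ++ [l]) (by simp [hlo]) f (agwFillB answerU l pattern) (guessed ++ [l])
            (update_possible_letters possible pattern guessed) (PySem.Set.add known l) (att + 1) (seq ++ [l])
            (by simp at hfuel ⊢; omega) ?_ ?_ ?_ ?_ ?_
          · intro s hs hsne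
            rcases mem_agwFillB' answerU l pattern s hs with h | h
            · exact List.mem_append.2 (Or.inl (hP1 s h hsne))
            · subst h; simp
          · intro x
            rw [PySem.Set.mem_add]
            constructor
            · rintro (h | h)
              · rcases (hK x).1 h with h' | h'
                · exact Or.inl (List.mem_append.2 (Or.inl h'))
                · exact Or.inr h'
              · subst h; exact Or.inl (by simp)
            · rintro (h | h)
              · rcases List.mem_append.1 h with h' | h'
                · exact Or.inl ((hK x).2 (Or.inl h'))
                · exact Or.inr (by simpa using h')
              · exact Or.inl ((hK x).2 (Or.inr h))
          · intro y hy
            rcases List.mem_append.1 hy with h | h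
            · rcases hpre y h with h' | h'
              · exact Or.inl (List.mem_append.2 (Or.inl h'))
              · exact Or.inr h'
            · have hy : y = l := by simpa using h
              exact Or.inl (by simp [hy])
          · intro x hx
            rw [upd_eq_filter'] at hx
            exact hposs x (List.mem_filter.1 hx).1
          · intro hstar' x hx hax
            have hstarf : "*" ∈ agwFillB answerU l pattern := by
              simpa [List.contains_eq_mem] using hstar'
            have hax' : x ∉ guessed ++ [l] ∧ x ∉ agwFillB answerU l pattern := by
              simpa [agwAvail, List.contains_eq_mem] using hax
            have hxg : x ∉ guessed := fun h => hax'.1 (List.mem_append.2 (Or.inl h))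
            have hxp : x ∉ pattern := by
              intro hxp
              by_cases hxs : x = "*"
              · subst hxs; exact hax'.2 hstarf
              · exact hax'.1 (List.mem_append.2 (Or.inl (hP1 x hxp hxs)))
            have hax0 : agwAvail pattern guessed x = true := by
              simp [agwAvail, List.contains_eq_mem, hxg, hxp]
            rw [upd_eq_filter']
            exact List.mem_filter.2 ⟨hposs2 hstar x hx hax0, hax0⟩
      · have hB := agwLoopB_no_star answerU (l :: rest') pattern known att seq (by simpa using hstar)
        have hstarm : "*" ∉ pattern := by simpa [List.contains_eq_mem] using hstar
        simp [agwLoopA, List.contains_eq_mem, hstarm, hB]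

theorem agw_ports_eq (pi ans : String) (lo : List String) :
    auto_guess_word pi ans lo = auto_guess_word_alt pi ans lo := by
  by_cases hstar0 : ((PySem.Str.upper pi).toList.map (fun c => String.ofList [c])).contains "*" = true
  · have hguess : ∀ x, x ∈ ((PySem.Str.upper pi).toList.map (fun c => String.ofList [c])).foldl
        (fun acc ch => if ch ≠ "*" then acc ++ [ch] else acc) ([] : List String)
        ↔ (x ∈ (PySem.Str.upper pi).toList.map (fun c => String.ofList [c]) ∧ x ≠ "*") := by
      intro x
      have hg := PySem.List.foldl_append_ite_eq_filter (p := fun ch : String => ch ≠ "*")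
        (l := (PySem.Str.upper pi).toList.map (fun c => String.ofList [c])) (acc := ([] : List String))
      rw [hg]
      simp
    have hmain := agw_main' ((PySem.Str.upper ans).toList) lo lo [] rfl (lo.length + 1)
      ((PySem.Str.upper pi).toList.map (fun c => String.ofList [c]))
      (((PySem.Str.upper pi).toList.map (fun c => String.ofList [c])).foldl
        (fun acc ch => if ch ≠ "*" then acc ++ [ch] else acc) [])
      lo (PySem.Set.ofList ((PySem.Str.upper pi).toList.map (fun c => String.ofList [c]))) 0 []
      (by omega)
      (fun s hs hne => (hguess s).2 ⟨hs, hne⟩)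
      (fun x => by
        rw [PySem.Set.mem_ofList]
        constructor
        · intro hx
          by_cases hxs : x = "*"
          · exact Or.inr hxs
          · exact Or.inl ((hguess x).2 ⟨hx, hxs⟩)
        · rintro (hx | rfl)
          · exact ((hguess x).1 hx).1
          · simpa [List.contains_eq_mem] using hstar0)
      (by simp) (fun x hx => hx) (fun _ x hx _ => hx)
    simp only [auto_guess_word, auto_guess_word_alt]
    rw [hmain]
  · simp only [auto_guess_word, auto_guess_word_alt]
    rw [agwLoopB_no_star _ _ _ _ _ _ (by simpa [List.contains_eq_mem] using hstar0)]
    simp only [List.contains_eq_mem, decide_eq_true_eq] at hstar0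
    simp at hstar0
    have hcond : ¬ ∃ a ∈ PySem.Chars.upper pi.toList, String.ofList [a] = "*" := by simpa using hstar0
    simp [agwLoopA, hcond]

-- ===== VERDICT (by name: the statement is the Claim_ definition above) =====
theorem auto_guess_word_spec : Claim_equal_auto_guess_word := by
  intro pattern_initial answer letter_order _ _
  unfold Spec_auto_guess_word
  exact agw_ports_eq pattern_initial answer letter_order
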